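-- pv_equiv track=rewrite | github.com/datastax-labs/hunter | hunter/util.py | remove_common_prefix
-- ===== SOURCE A (Python) =====
-- from typing import Dict, List, Optional, Set, TypeVar
--
-- def remove_common_prefix(names: List[str], sep: str = ".") -> List[str]:
--     """"""
--
--     if len(names) == 0:
--         return names
--
--     split_names = [name.split(sep) for name in names]
--     min_len = min(len(components) for components in split_names)
--
--     def are_same(index: int) -> bool:
--         return all(c[index] == split_names[0][index] for c in split_names)
--
--     prefix_len = 0
--     while prefix_len + 1 < min_len and are_same(prefix_len):
--         prefix_len += 1
--
--     return [sep.join(components[prefix_len:]) for components in split_names]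
-- ===== SOURCE B (Python) =====
-- def remove_common_prefix(names, sep="."):
--     if len(names) == 0:
--         return names
--     parts = [name.split(sep) for name in names]
--     # Peel: while every split name still has a spare component and all the
--     # first components agree, drop that shared first component everywhere.
--     while all(len(p) > 1 for p in parts) and len({p[0] for p in parts}) == 1:
--         parts = [p[1:] for p in parts]
--     return [sep.join(p) for p in parts]
-- ===== Notes on version B (the rewrite author's own statement) =====
-- stated objective: alternative
-- what changed: B repeatedly peels the shared first component off every split name in a data-shrinking loop (no index, no min-length computation, no prefix counter) and joins whatever is left, instead of A's indexed while-loop scanning a fixed table with are_same(index).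
import Mathlib
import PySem

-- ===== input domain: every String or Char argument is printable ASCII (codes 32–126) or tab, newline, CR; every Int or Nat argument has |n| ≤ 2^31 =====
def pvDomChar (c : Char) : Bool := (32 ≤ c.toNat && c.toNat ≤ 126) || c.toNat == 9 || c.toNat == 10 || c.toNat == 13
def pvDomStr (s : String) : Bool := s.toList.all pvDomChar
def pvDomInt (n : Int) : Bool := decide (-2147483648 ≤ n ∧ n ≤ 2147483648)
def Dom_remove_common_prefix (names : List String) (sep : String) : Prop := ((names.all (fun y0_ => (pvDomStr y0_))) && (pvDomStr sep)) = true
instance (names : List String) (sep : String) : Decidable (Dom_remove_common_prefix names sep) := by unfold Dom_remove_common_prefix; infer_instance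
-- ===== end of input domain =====

-- B strips the common prefix by repeatedly peeling the shared first component off the shrinking
-- split names (no index, no min length, no prefix counter), instead of A's indexed while-loop
-- with an are_same(index) scan (objective: alternative).


-- ===== PORT A =====
-- the 'while prefix_len + 1 < min_len and are_same(prefix_len)' loop; fuel = min_len bounds the
-- ≤ min_len - 1 iterations the guard allows, so the fuel never runs out
def pvLoopA (min_len : Int) (are_same : Int → Bool) : Nat → Int → Int
  | 0, p => p
  | fuel+1, p => if p + 1 < min_len && are_same p then pvLoopA min_len are_same fuel (p + 1) else p

def remove_common_prefix (names : List String) (sep : String) : List String :=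
  if names.length = 0 then names
  else
    -- name.split(sep); Pre_ gives sep ≠ "", so split? is some (the ValueError case is excluded)
    let split_names := names.map (fun name => (PySem.Str.split? name sep).getD [])
    -- min(...) over a nonempty list (names ≠ [] here), so the default is never used
    let min_len : Int := ((split_names.map (fun components => (components.length : Int))).min?).getD 0
    -- are_same(index): c[index] is always in range when called (0 ≤ index < min_len ≤ len c), so pyGetD is exact
    let are_same : Int → Bool := fun index =>
      split_names.all (fun c =>
        PySem.List.pyGetD c index "" == PySem.List.pyGetD (PySem.List.pyGetD split_names 0 []) index "")
    let prefix_len := pvLoopA min_len are_same min_len.toNat 0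
    split_names.map (fun components => PySem.Str.join sep (PySem.List.slice components (some prefix_len) none))

-- ===== PORT B =====
-- the peeling while-loop: while every split name has a spare component and all the first
-- components agree ({p[0] for p in parts} is a singleton), drop the first component everywhere
-- (p[1:] = List.drop 1); when the loop stops, join what is left
-- sum of lengths never grows under dropping heads (used only for pvPeel's termination)
lemma pv_drop1_sum_le (l : List (List String)) :
    ((l.map (fun p => p.drop 1)).map List.length).sum ≤ (l.map List.length).sum := by
  induction l with
  | nil => simp
  | cons q t ih => simp only [List.map_cons, List.sum_cons, List.length_drop]; omega

def pvPeel (sep : String) (parts : List (List String)) : List String :=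
  if h : parts.all (fun p => 1 < p.length) &&
         (PySem.Set.len (PySem.Set.ofList (parts.map (fun p => p.headD ""))) == 1)
  then pvPeel sep (parts.map (fun p => p.drop 1))
  else parts.map (fun p => PySem.Str.join sep p)
termination_by (parts.map List.length).sum
decreasing_by
  simp only [Bool.and_eq_true, List.all_eq_true, decide_eq_true_eq, beq_iff_eq] at h
  obtain ⟨h1, h2⟩ := h
  cases parts with
  | nil => simp [PySem.Set.ofList, PySem.Set.len] at h2
  | cons p rest =>
    have hp : 1 < p.length := h1 p List.mem_cons_self
    have hrest := pv_drop1_sum_le rest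
    simp [Function.comp] at hrest ⊢
    have hr2 : (List.map (List.length ∘ List.tail) rest).sum ≤ (List.map List.length rest).sum := hrest
    omega

def remove_common_prefix_alt (names : List String) (sep : String) : List String :=
  if names.length = 0 then names
  else pvPeel sep (names.map (fun name => (PySem.Str.split? name sep).getD []))

-- ===== PRECONDITION & SPEC =====
-- Pre_ excludes only the inputs where A raises: str.split("") raises ValueError (reached iff names ≠ []); B raises there too.
def Pre_remove_common_prefix (names : List String) (sep : String) : Prop := names = [] ∨ sep ≠ ""
instance (names : List String) (sep : String) : Decidable (Pre_remove_common_prefix names sep) := by unfold Pre_remove_common_prefix; infer_instance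
def pvWitness_remove_common_prefix : List String × String := (["a.b.x", "a.b.y"], ".")

def Spec_remove_common_prefix (names : List String) (sep : String) (out : List String) : Prop := out = remove_common_prefix_alt names sep
instance (names : List String) (sep : String) (out : List String) : Decidable (Spec_remove_common_prefix names sep out) := by unfold Spec_remove_common_prefix; infer_instance

-- ===== CLAIM (what is proved, stated in full; the proofs are below) =====
def Claim_equal_remove_common_prefix : Prop := ∀ (names : List String) (sep : String), Dom_remove_common_prefix names sep → Pre_remove_common_prefix names sep → Spec_remove_common_prefix names sep (remove_common_prefix names sep)

-- ===== LEMMAS AND PROOFS =====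

-- split never returns an empty list: splitOn.go always conses onto acc
lemma pv_go_len (sep : List Char) : ∀ (fuel : Nat) (l cur : List Char) (acc : List (List Char)),
    acc.length < (PySem.Chars.splitOn.go sep fuel l cur acc).length := by
  intro fuel
  induction fuel with
  | zero => intro l cur acc; simp [PySem.Chars.splitOn.go]
  | succ f ih =>
    intro l cur acc
    cases l with
    | nil => simp [PySem.Chars.splitOn.go]
    | cons c rest =>
      rw [PySem.Chars.splitOn.go]
      split_ifs with h
      · exact Nat.lt_of_succ_le (Nat.le_of_lt
          (by simpa using ih (List.drop sep.length (c::rest)) [] (cur.reverse :: acc)))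
      · exact ih rest (c :: cur) acc

lemma pv_split_len (s sep : String) (h : sep ≠ "") :
    1 ≤ ((PySem.Str.split? s sep).getD []).length := by
  have hsep : sep.toList ≠ [] := fun hc => h (String.toList_eq_nil_iff.mp hc)
  have hb := PySem.Str.split?_map s sep
  rw [PySem.Chars.split?, if_neg (by simpa using hsep)] at hb
  cases hs : PySem.Str.split? s sep with
  | none => rw [hs] at hb; simp at hb
  | some l =>
    rw [Option.getD_some]
    rw [hs] at hb
    simp only [Option.map_some, Option.some.injEq] at hb
    have hlen : l.length = (PySem.Chars.splitOn s.toList sep.toList).length := by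
      rw [← hb]; simp
    have hg := pv_go_len sep.toList (s.toList.length + 1) s.toList [] []
    rw [PySem.Chars.splitOn] at hlen
    simp only [List.length_nil] at hg
    omega

lemma pv_min?_map_cast (l : List Nat) :
    (l.map (fun n : Nat => (n : Int))).min? = l.min?.map (fun n : Nat => (n : Int)) := by
  induction l with
  | nil => rfl
  | cons a t ih =>
    rw [List.map_cons, List.min?_cons, List.min?_cons, ih]
    cases t.min? <;> simp [Nat.cast_min]

-- the set of p-th components is a singleton iff A's are_same(p) holds
lemma pv_key (SN : List (List String)) (h : SN ≠ []) (i : Nat) :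
    (SN.all (fun c =>
        PySem.List.pyGetD c (i : Int) "" == PySem.List.pyGetD (PySem.List.pyGetD SN 0 []) (i : Int) ""))
    = (PySem.Set.len (PySem.Set.ofList (SN.map (fun r => r.getD i ""))) == 1) := by
  obtain ⟨s0, rest, rfl⟩ := List.exists_cons_of_ne_nil h
  have e1 : PySem.List.pyGetD (s0 :: rest) 0 [] = s0 := by
    simp [PySem.List.pyGetD_ofNat']
  rw [e1, List.map_cons, PySem.Set.ofList_cons]
  simp only [PySem.List.pyGetD_natCast]
  rw [Bool.eq_iff_iff]
  simp only [List.all_cons, beq_self_eq_true, Bool.true_and, List.all_eq_true, beq_iff_eq,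
    PySem.Set.len, List.length_cons]
  constructor
  · intro hall
    have hnil : (PySem.Set.ofList (rest.map (fun r => r.getD i ""))).discard (s0.getD i "") = [] := by
      rw [List.eq_nil_iff_forall_not_mem]
      intro y hy
      rw [PySem.Set.mem_discard] at hy
      obtain ⟨hy1, hy2⟩ := hy
      rw [PySem.Set.mem_ofList, List.mem_map] at hy1
      obtain ⟨r, hr, rfl⟩ := hy1
      exact hy2 (hall r hr)
    rw [hnil]
    simp
  · intro hlen c hc
    have hnil : (PySem.Set.ofList (rest.map (fun r => r.getD i ""))).discard (s0.getD i "") = [] := by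
      exact List.length_eq_zero_iff.mp (by omega)
    by_contra hne
    have hmem : c.getD i "" ∈ (PySem.Set.ofList (rest.map (fun r => r.getD i ""))).discard (s0.getD i "") := by
      rw [PySem.Set.mem_discard, PySem.Set.mem_ofList, List.mem_map]
      exact ⟨⟨c, hc, rfl⟩, hne⟩
    rw [hnil] at hmem
    exact absurd hmem (List.not_mem_nil)

-- head of the list dropped p times is the p-th element (with the same default)
lemma pv_head_drop (r : List String) (p : Nat) : (r.drop p).headD "" = r.getD p "" := by
  simp [List.head?_drop, List.getD]

-- the all-lengths-spare guard over the dropped lists decides p + 1 < (the minimum length)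
lemma pv_all_len (SN : List (List String)) (a p : Nat)
    (ha : (SN.map List.length).min? = some a) :
    ((SN.map (List.drop p)).all (fun l => decide (1 < l.length))) = decide (p + 1 < a) := by
  obtain ⟨hmem, hle⟩ := List.min?_eq_some_iff.mp ha
  rw [List.mem_map] at hmem
  obtain ⟨r0, hr0, hr0len⟩ := hmem
  rw [Bool.eq_iff_iff]
  simp only [List.all_map, List.all_eq_true, Function.comp_apply, decide_eq_true_eq,
    List.length_drop]
  constructor
  · intro hall
    have := hall r0 hr0
    omega
  · intro hlt r hr
    have := hle r.length (List.mem_map_of_mem hr)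
    omega

-- A's fuelled indexed loop and B's peeling recursion compute the same result
lemma pv_peel_loop (sep : String) (SN : List (List String)) (hne : SN ≠ [])
    (a : Nat) (ha : (SN.map List.length).min? = some a) :
    ∀ (fuel p : Nat), a ≤ fuel + p + 1 → p < a →
      ∃ q : Nat,
        pvLoopA (a : Int)
          (fun index => SN.all (fun c =>
            PySem.List.pyGetD c index "" == PySem.List.pyGetD (PySem.List.pyGetD SN 0 []) index ""))
          fuel (p : Int) = (q : Int) ∧
        pvPeel sep (SN.map (List.drop p)) = SN.map (fun r => PySem.Str.join sep (r.drop q)) := by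
  intro fuel
  induction fuel with
  | zero =>
    intro p hf hp
    refine ⟨p, rfl, ?_⟩
    rw [pvPeel, dif_neg, List.map_map]
    · rfl
    · rw [pv_all_len SN a p ha]
      simp only [Bool.and_eq_true, decide_eq_true_eq]
      rintro ⟨h1, -⟩
      omega
  | succ f ih =>
    intro p hf hp
    -- the heads of the dropped lists are the p-th components
    have hheads : ((SN.map (List.drop p)).map (fun l => l.headD "")) = SN.map (fun r => r.getD p "") := by
      rw [List.map_map]
      exact List.map_congr_left (fun r _ => pv_head_drop r p)
    have hcond : ((SN.map (List.drop p)).all (fun l => decide (1 < l.length)) &&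
        (PySem.Set.len (PySem.Set.ofList ((SN.map (List.drop p)).map (fun l => l.headD ""))) == 1))
        = (decide ((p : Int) + 1 < (a : Int)) &&
           SN.all (fun c =>
             PySem.List.pyGetD c (p : Int) "" == PySem.List.pyGetD (PySem.List.pyGetD SN 0 []) (p : Int) "")) := by
      rw [pv_all_len SN a p ha, hheads, pv_key SN hne p]
      congr 1
      simp only [decide_eq_decide]
      omega
    rw [pvLoopA]
    cases hA : (decide ((p : Int) + 1 < (a : Int)) &&
        SN.all (fun c =>
          PySem.List.pyGetD c (p : Int) "" == PySem.List.pyGetD (PySem.List.pyGetD SN 0 []) (p : Int) "")) with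
    | false =>
      refine ⟨p, by simp, ?_⟩
      rw [pvPeel, dif_neg, List.map_map]
      · rfl
      · rw [hcond, hA]; simp
    | true =>
      have hlt : p + 1 < a := by
        have := (Bool.and_eq_true _ _).mp hA |>.1
        have := of_decide_eq_true this
        omega
      have hdrop : (SN.map (List.drop p)).map (fun l => l.drop 1) = SN.map (List.drop (p + 1)) := by
        rw [List.map_map]
        refine List.map_congr_left (fun r _ => ?_)
        simp
      obtain ⟨q, hq1, hq2⟩ := ih (p + 1) (by omega) (by omega)
      refine ⟨q, ?_, ?_⟩
      · rw [if_pos rfl]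
        rw [show ((p : Int) + 1) = ((p + 1 : Nat) : Int) by push_cast; ring]
        exact hq1
      · rw [pvPeel, dif_pos, hdrop]
        · exact hq2
        · rw [hcond, hA]

-- ===== VERDICT (by name: the statement is the Claim_ definition above) =====
theorem remove_common_prefix_spec : Claim_equal_remove_common_prefix := by
  unfold Claim_equal_remove_common_prefix
  intro names sep _ hPre
  unfold Spec_remove_common_prefix
  by_cases hn : names = []
  · subst hn; rfl
  · have hsep : sep ≠ "" := hPre.resolve_left hn
    rw [remove_common_prefix, remove_common_prefix_alt,
      if_neg (by simpa using hn), if_neg (by simpa using hn)]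
    set SN : List (List String) := names.map (fun name => (PySem.Str.split? name sep).getD []) with hSN
    have hSNne : SN ≠ [] := by rw [hSN]; simpa using hn
    have hall1 : ∀ r ∈ SN, 1 ≤ r.length := by
      intro r hr
      rw [hSN, List.mem_map] at hr
      obtain ⟨name, _, rfl⟩ := hr
      exact pv_split_len name sep hsep
    clear_value SN
    dsimp only
    obtain ⟨a, ha⟩ : ∃ a, (SN.map List.length).min? = some a := by
      cases hmm : (SN.map List.length).min? with
      | none => exact absurd (List.min?_eq_none_iff.mp hmm) (by simpa using hSNne)
      | some a => exact ⟨a, rfl⟩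
    have hmap : SN.map (fun components => (components.length : Int))
        = (SN.map List.length).map (fun n : Nat => (n : Int)) := by
      rw [List.map_map]; rfl
    have hmin : ((SN.map (fun components => (components.length : Int))).min?).getD 0 = ((a : Nat) : Int) := by
      rw [hmap, pv_min?_map_cast, ha]; rfl
    have h1m : 1 ≤ a := by
      have hmem := List.min?_mem ha
      rw [List.mem_map] at hmem
      obtain ⟨c, hc, rfl⟩ := hmem
      exact hall1 c hc
    rw [hmin, Int.toNat_natCast]
    obtain ⟨q, hq1, hq2⟩ := pv_peel_loop sep SN hSNne a ha a 0 (by omega) (by omega)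
    rw [show ((0 : Nat) : Int) = (0 : Int) from rfl] at hq1
    rw [hq1]
    have hdz : SN.map (List.drop 0) = SN := by
      have h0 := List.map_congr_left (l := SN) (f := List.drop 0) (g := id) (fun r _ => by simp)
      simpa using h0
    rw [hdz] at hq2
    rw [hq2]
    apply List.map_congr_left
    intro c _
    rw [PySem.List.slice_from_natCast]
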